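-- pv_equiv track=rewrite | github.com/TheWees/abcxyz | 43K_B/lab2.py | accuracyALS
-- ===== SOURCE A (Python) =====
-- def accuracyALS(actual, recommendations):
--     prediction = []
--     if(not recommendations) :
--         return False
--     else :
--         for item_score in recommendations:
--             prediction.append(item_score[0]) # just want the item not rating
--         intersectItems = (set(prediction)).intersection(set(actual))
--         return len(intersectItems) >= 1
-- ===== SOURCE B (Python) =====
-- def accuracyALS(actual, recommendations):
--     # single short-circuiting scan over recommendations; only the actual side is indexed
--     actual_set = set(actual)
--     for item_score in recommendations:
--         if item_score[0] in actual_set: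
--             return True
--     return False
-- ===== Notes on version B (the rewrite author's own statement) =====
-- stated objective: simpler
-- what changed: Instead of building a prediction list plus two sets and intersecting them, B builds set(actual) once and scans recommendations with an early-exit membership test.
import Mathlib
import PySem

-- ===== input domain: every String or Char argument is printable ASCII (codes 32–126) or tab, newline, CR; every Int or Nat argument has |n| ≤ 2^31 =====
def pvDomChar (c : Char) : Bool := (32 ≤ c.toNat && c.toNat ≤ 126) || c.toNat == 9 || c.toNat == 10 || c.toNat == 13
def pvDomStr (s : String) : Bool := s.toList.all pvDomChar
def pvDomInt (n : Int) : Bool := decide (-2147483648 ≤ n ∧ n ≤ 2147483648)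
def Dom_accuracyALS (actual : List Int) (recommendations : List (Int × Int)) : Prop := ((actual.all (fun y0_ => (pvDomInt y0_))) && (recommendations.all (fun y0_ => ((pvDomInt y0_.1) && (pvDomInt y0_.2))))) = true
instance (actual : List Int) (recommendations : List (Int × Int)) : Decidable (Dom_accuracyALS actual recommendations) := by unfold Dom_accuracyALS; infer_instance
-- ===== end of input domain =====

-- B replaces A's build-both-sets-and-intersect with one early-exit membership scan over recommendations (simpler; same result).

-- ===== PORT A =====
def accuracyALS (actual : List Int) (recommendations : List (Int × Int)) : Bool :=
  if recommendations = [] then false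
  else
    let prediction : List Int := recommendations.foldl (fun acc item_score => acc ++ [item_score.1]) []
    let intersectItems : PySem.Set Int := PySem.Set.inter (PySem.Set.ofList prediction) (PySem.Set.ofList actual)
    decide ((PySem.Set.len intersectItems) ≥ 1)

-- ===== PORT B =====
def accuracyALSAltLoop (actualSet : PySem.Set Int) : List (Int × Int) → Bool
  | [] => false
  | item_score :: rest =>
    if PySem.Set.contains actualSet item_score.1 then true
    else accuracyALSAltLoop actualSet rest

def accuracyALS_alt (actual : List Int) (recommendations : List (Int × Int)) : Bool :=
  accuracyALSAltLoop (PySem.Set.ofList actual) recommendations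

-- ===== PRECONDITION & SPEC =====
def Spec_accuracyALS (actual : List Int) (recommendations : List (Int × Int)) (out : Bool) : Prop := out = accuracyALS_alt actual recommendations
instance (actual : List Int) (recommendations : List (Int × Int)) (out : Bool) : Decidable (Spec_accuracyALS actual recommendations out) := by unfold Spec_accuracyALS; infer_instance

-- ===== CLAIM (what is proved, stated in full; the proofs are below) =====
def Claim_equal_accuracyALS : Prop := ∀ (actual : List Int) (recommendations : List (Int × Int)), Dom_accuracyALS actual recommendations → Spec_accuracyALS actual recommendations (accuracyALS actual recommendations)

-- ===== LEMMAS AND PROOFS =====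

theorem altLoop_eq_any (s : PySem.Set Int) (recs : List (Int × Int)) :
    accuracyALSAltLoop s recs = recs.any (fun p => PySem.Set.contains s p.1) := by
  induction recs with
  | nil => rfl
  | cons p rest ih =>
    simp only [accuracyALSAltLoop, List.any_cons, ih]
    by_cases h : PySem.Set.contains s p.1 <;> simp

theorem foldl_append_fst (recs : List (Int × Int)) (acc : List Int) :
    recs.foldl (fun acc item_score => acc ++ [item_score.1]) acc = acc ++ recs.map Prod.fst := by
  induction recs generalizing acc with
  | nil => simp
  | cons p rest ih => simp [List.foldl, ih]

theorem accuracyALS_spec : Claim_equal_accuracyALS := by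
  intro actual recs _
  unfold Spec_accuracyALS accuracyALS accuracyALS_alt
  rw [altLoop_eq_any]
  by_cases hr : recs = []
  · simp [hr]
  · simp only [hr, foldl_append_fst, List.nil_append]
    set I := PySem.Set.inter (PySem.Set.ofList (recs.map Prod.fst)) (PySem.Set.ofList actual) with hI
    have hmemI : ∀ x, x ∈ I ↔ (∃ p ∈ recs, p.1 = x) ∧ x ∈ actual := by
      intro x
      rw [hI, PySem.Set.mem_inter, PySem.Set.mem_ofList, PySem.Set.mem_ofList, List.mem_map]
    cases hA : recs.any (fun p => PySem.Set.contains (PySem.Set.ofList actual) p.1) with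
    | true =>
      obtain ⟨p, hp, hc⟩ := List.any_eq_true.1 hA
      have hxa : p.1 ∈ actual := (PySem.Set.mem_ofList _ _).1 ((PySem.Set.contains_iff _ _).1 hc)
      have hxI : p.1 ∈ I := (hmemI p.1).2 ⟨⟨p, hp, rfl⟩, hxa⟩
      have hL : decide (PySem.Set.len I ≥ 1) = true := by
        unfold PySem.Set.len
        have := List.length_pos_of_mem hxI
        simp
        omega
      rw [hL]; simp
    | false =>
      have hno := List.any_eq_false.1 hA
      have hempty : I = [] := by
        rcases hI2 : I with _ | ⟨x, rest⟩
        · rfl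
        · exfalso
          have hx : x ∈ I := by rw [hI2]; exact List.mem_cons_self
          obtain ⟨⟨p, hp, hpx⟩, hxa⟩ := (hmemI x).1 hx
          exact hno p hp ((PySem.Set.contains_iff _ _).2 ((PySem.Set.mem_ofList _ _).2 (hpx ▸ hxa)))
      have hL : decide (PySem.Set.len I ≥ 1) = false := by
        unfold PySem.Set.len
        rw [hempty]
        simp
      rw [hL]; simp

-- ===== VERDICT (by name: the statement is the Claim_ definition above) =====
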